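-- pv_equiv track=rewrite | github.com/kemaleren/bwt | bwt.py | get_occ
-- ===== SOURCE A (Python) =====
-- def get_occ(bwt):
--     """
--     Returns occurrence information for letters in the string 'bwt'.
--     occ[letter][i] = the number of occurrences of 'letter' in
--     bwt[0, i + 1].
--
--     Examples:
--     ---------
--
--     >>> get_occ('annb\x00aa')
--     {'\x00': [0, 0, 0, 0, 1, 1, 1],
--     'a': [1, 1, 1, 1, 1, 2, 3],
--     'b': [0, 0, 0, 1, 1, 1, 1],
--     'n': [0, 1, 2, 2, 2, 2, 2]}
--
--     """
--     letters = set(bwt)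
--     occ = {}
--     for letter in letters:
--         occ[letter] = []
--         for i in range(len(bwt)):
--             occ[letter].append(len([j for j in bwt[:i + 1] if j == letter]))
--     return occ
-- ===== SOURCE B (Python) =====
-- def get_occ(bwt):
--     """Running-counter re-implementation: one left-to-right pass per letter,
--     carrying the count so far, instead of recounting each prefix."""
--     occ = {}
--     for letter in dict.fromkeys(bwt):
--         counts = []
--         k = 0
--         for ch in bwt:
--             if ch == letter:
--                 k += 1
--             counts.append(k)
--         occ[letter] = counts
--     return occ
-- ===== Notes on version B (the rewrite author's own statement) =====
-- stated objective: faster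
-- what changed: replaces the per-index recount of each prefix (len of a filtered slice for every i) with a single left-to-right pass per letter that carries a running counter
import Mathlib
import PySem

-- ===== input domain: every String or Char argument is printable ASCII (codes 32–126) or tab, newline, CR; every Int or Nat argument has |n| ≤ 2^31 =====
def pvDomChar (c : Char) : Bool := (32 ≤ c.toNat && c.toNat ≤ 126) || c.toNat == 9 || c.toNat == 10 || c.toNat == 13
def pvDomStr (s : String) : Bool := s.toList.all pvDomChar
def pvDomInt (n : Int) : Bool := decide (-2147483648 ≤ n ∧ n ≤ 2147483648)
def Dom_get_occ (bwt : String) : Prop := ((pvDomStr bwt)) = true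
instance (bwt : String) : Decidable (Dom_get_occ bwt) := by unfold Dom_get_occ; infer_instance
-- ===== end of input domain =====

-- B replaces A's per-index prefix recount with one running-counter pass per letter (asymptotically faster; returned dict identical).


-- ===== PORT A =====
-- letters = set(bwt); for each letter, for i in range(len(bwt)): append len([j for j in bwt[:i+1] if j == letter])
def get_occ (bwt : String) : List (String × List Int) :=
  let letters : List String := PySem.Set.ofList (bwt.toList.map (fun c => String.ofList [c]))
  (letters.foldl (fun (occ : PySem.Dict String (List Int)) letter =>
      occ.insert letter
        ((PySem.List.pyRange 0 (bwt.toList.length : Int) 1).foldl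
          (fun lst i =>
            lst ++ [(((PySem.List.slice bwt.toList none (some (i + 1))).filter
                        (fun j => String.ofList [j] == letter)).length : Int)])
          [])) PySem.Dict.empty).items

-- ===== PORT B =====
-- for each letter (first-occurrence order), one pass over bwt carrying a running counter k
def get_occ_alt (bwt : String) : List (String × List Int) :=
  let letters : List String := PySem.List.dedup (bwt.toList.map (fun c => String.ofList [c]))
  (letters.foldl (fun (occ : PySem.Dict String (List Int)) letter =>
      occ.insert letter
        ((bwt.toList.foldl
            (fun (st : Int × List Int) ch =>
              let k := if String.ofList [ch] == letter then st.1 + 1 else st.1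
              (k, st.2 ++ [k]))
            ((0 : Int), ([] : List Int))).2)) PySem.Dict.empty).items

-- ===== PRECONDITION & SPEC =====
def Spec_get_occ (bwt : String) (out : List (String × List Int)) : Prop := out = get_occ_alt bwt
instance (bwt : String) (out : List (String × List Int)) : Decidable (Spec_get_occ bwt out) := by unfold Spec_get_occ; infer_instance

-- ===== CLAIM (what is proved, stated in full; the proofs are below) =====
def Claim_equal_get_occ : Prop := ∀ (bwt : String), Dom_get_occ bwt → Spec_get_occ bwt (get_occ bwt)

-- ===== LEMMAS AND PROOFS =====

-- B's running-counter pass, characterised: entry i is (start value) + count of matches in the prefix of length i+1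
theorem run_counts (p : Char → Bool) (xs : List Char) (k : Int) (acc : List Int) :
    (xs.foldl
        (fun (st : Int × List Int) ch =>
          let k' := if p ch then st.1 + 1 else st.1
          (k', st.2 ++ [k']))
        (k, acc)).2
      = acc ++ (List.range xs.length).map (fun i => k + ((xs.take (i + 1)).countP p : Int)) := by
  induction xs generalizing k acc with
  | nil => simp
  | cons x xs ih =>
      simp only [List.foldl_cons, ih, List.length_cons, List.range_succ_eq_map, List.map_cons,
        List.map_map]
      rw [List.append_assoc]
      congr 1
      simp only [List.take_succ_cons, List.countP_cons, Function.comp_def]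
      by_cases hx : p x = true <;> simp [hx]
      intro i _
      omega

-- A's inner loop, characterised the same way
theorem innerA_eq (bwt : List Char) (letter : String) :
    (PySem.List.pyRange 0 (bwt.length : Int) 1).foldl
        (fun lst i =>
          lst ++ [(((PySem.List.slice bwt none (some (i + 1))).filter
                      (fun j => String.ofList [j] == letter)).length : Int)])
        []
      = (List.range bwt.length).map
          (fun i => ((bwt.take (i + 1)).countP (fun j => String.ofList [j] == letter) : Int)) := by
  rw [PySem.List.foldl_append_singleton_eq_map, PySem.List.pyRange_one]
  simp only [Int.sub_zero, Int.toNat_natCast, List.map_map, List.nil_append]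
  apply List.map_congr_left
  intro i _
  simp only [Function.comp_def, zero_add]
  have : ((i : Int) + 1) = ((i + 1 : Nat) : Int) := by push_cast; ring
  rw [this, PySem.List.slice_to_natCast, List.countP_eq_length_filter]

theorem get_occ_spec : Claim_equal_get_occ := by
  intro bwt _
  unfold Spec_get_occ get_occ get_occ_alt
  simp only [PySem.List.dedup_eq_ofList]
  congr 1
  apply PySem.List.foldl_congr_mem
  intro occ letter _
  rw [innerA_eq, run_counts]
  simp
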